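-- pv_equiv track=rewrite | github.com/kaleywong/Cats | typing.py | swap_diff
-- ===== SOURCE A (Python) =====
-- def swap_diff(start, goal, limit):
--     """A diff function for autocorrect that determines how many letters
--     in START need to be substituted to create GOAL, then adds the difference in
--     their lengths.
--     """
--
--     if goal == "":
--         if len(start) <= limit:
--             return len(start)
--         else:
--             return limit+1
--
--     if start == "":
--
--         if len(goal) <= limit:
--             return len(goal)
--         else:
--             return limit+1
--
--     if start[0] == goal[0]:
--         return swap_diff(start[1:],goal[1:], limit)
--     if limit == 0:
--         return 1
--
--     if start[0] != goal[0]: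
--         return 1+swap_diff(start[1:],goal[1:], limit-1)
-- ===== SOURCE B (Python) =====
-- def swap_diff(start, goal, limit):
--     t = abs(len(start) - len(goal)) + sum(1 for a, b in zip(start, goal) if a != b)
--     return t if t <= limit else limit + 1
-- ===== Notes on version B (the rewrite author's own statement) =====
-- stated objective: faster
-- what changed: Replaced the per-character recursion with repeated string slicing by a single zip pass counting mismatches plus the length difference, with the limit applied once as a closed-form cap.
import Mathlib
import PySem

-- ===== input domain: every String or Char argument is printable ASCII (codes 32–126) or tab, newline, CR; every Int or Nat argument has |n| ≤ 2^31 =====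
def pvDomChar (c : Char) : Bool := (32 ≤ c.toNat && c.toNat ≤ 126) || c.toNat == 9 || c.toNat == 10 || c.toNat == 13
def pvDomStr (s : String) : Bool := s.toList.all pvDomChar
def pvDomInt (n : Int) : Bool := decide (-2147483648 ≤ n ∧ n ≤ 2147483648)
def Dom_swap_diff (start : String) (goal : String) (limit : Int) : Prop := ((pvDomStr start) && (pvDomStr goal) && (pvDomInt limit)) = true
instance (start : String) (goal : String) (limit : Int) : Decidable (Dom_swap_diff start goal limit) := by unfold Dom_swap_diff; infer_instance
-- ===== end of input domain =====

-- B replaces A's slicing recursion by one zip pass counting mismatches, then caps once at limit+1 (asymptotically faster).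

-- ===== PORT A =====
-- A's recursion on the two strings: goal=="" and start=="" bases, then head comparison with limit bookkeeping.
def swapDiffRec : List Char → List Char → Int → Int
  | s, [], limit => if (s.length : Int) ≤ limit then (s.length : Int) else limit + 1
  | [], g, limit => if (g.length : Int) ≤ limit then (g.length : Int) else limit + 1
  | a :: s, b :: g, limit =>
      if a = b then swapDiffRec s g limit
      else if limit = 0 then 1
      else 1 + swapDiffRec s g (limit - 1)

def swap_diff (start : String) (goal : String) (limit : Int) : Int :=
  swapDiffRec start.toList goal.toList limit

-- ===== PORT B =====
-- sum(1 for a, b in zip(start, goal) if a != b)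
def mismatchCount (s g : List Char) : Int :=
  (((s.zip g).filter (fun p => p.1 ≠ p.2)).length : Int)

def swap_diff_alt (start : String) (goal : String) (limit : Int) : Int :=
  let t : Int := |(start.toList.length : Int) - (goal.toList.length : Int)| +
                 mismatchCount start.toList goal.toList
  if t ≤ limit then t else limit + 1

-- ===== PRECONDITION & SPEC =====
def Spec_swap_diff (start : String) (goal : String) (limit : Int) (out : Int) : Prop := out = swap_diff_alt start goal limit
instance (start : String) (goal : String) (limit : Int) (out : Int) : Decidable (Spec_swap_diff start goal limit out) := by unfold Spec_swap_diff; infer_instance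

-- ===== CLAIM (what is proved, stated in full; the proofs are below) =====
def Claim_equal_swap_diff : Prop := ∀ (start : String) (goal : String) (limit : Int), Dom_swap_diff start goal limit → Spec_swap_diff start goal limit (swap_diff start goal limit)

-- ===== LEMMAS AND PROOFS =====

theorem mismatchCount_nonneg (s g : List Char) : 0 ≤ mismatchCount s g := by
  unfold mismatchCount; positivity

theorem mismatchCount_cons (a b : Char) (s g : List Char) :
    mismatchCount (a :: s) (b :: g) = (if a = b then 0 else 1) + mismatchCount s g := by
  unfold mismatchCount
  by_cases h : a = b
  · simp [h]
  · simp [h]; ring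

-- A's recursion equals B's closed form: mismatches in the overlap plus the length difference, capped at limit+1.
theorem swapDiffRec_closed (s g : List Char) (limit : Int) :
    swapDiffRec s g limit =
      (if |(s.length : Int) - (g.length : Int)| + mismatchCount s g ≤ limit
       then |(s.length : Int) - (g.length : Int)| + mismatchCount s g
       else limit + 1) := by
  induction s generalizing g limit with
  | nil =>
    cases g with
    | nil => simp [swapDiffRec, mismatchCount]
    | cons b g =>
      simp only [swapDiffRec, mismatchCount, List.zip_nil_left, List.filter_nil,
        List.length_nil, List.length_cons]
      push_cast
      rw [abs_of_nonpos (by omega)]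
      split_ifs <;> omega
  | cons a s ih =>
    cases g with
    | nil =>
      simp only [swapDiffRec, mismatchCount, List.zip_nil_right, List.filter_nil,
        List.length_nil, List.length_cons]
      push_cast
      rw [abs_of_nonneg (by omega)]
      split_ifs <;> omega
    | cons b g =>
      have habs : |((a :: s).length : Int) - ((b :: g).length : Int)|
          = |(s.length : Int) - (g.length : Int)| := by
        simp only [List.length_cons]; push_cast; ring_nf
      have hm := mismatchCount_cons a b s g
      have hnn := mismatchCount_nonneg s g
      have hab : (0:Int) ≤ |(s.length : Int) - (g.length : Int)| := abs_nonneg _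
      by_cases h : a = b
      · simp only [swapDiffRec]
        rw [if_pos h, habs, hm, if_pos h, zero_add, ih]
      · simp only [swapDiffRec]
        rw [if_neg h, habs, hm, if_neg h]
        by_cases hl : limit = 0
        · subst hl
          rw [if_pos rfl, if_neg (by omega)]
          norm_num
        · rw [if_neg hl, ih]
          split_ifs <;> omega

-- ===== VERDICT (by name: the statement is the Claim_ definition above) =====
theorem swap_diff_spec : Claim_equal_swap_diff := by
  intro start goal limit _
  unfold Spec_swap_diff swap_diff swap_diff_alt
  simp only [swapDiffRec_closed]
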